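-- pv_equiv track=rewrite | github.com/duell-dev/advent-of-code-2025 | 2/aoc2.py | generate_repeated_numbers
-- ===== SOURCE A (Python) =====
-- def generate_repeated_numbers(max_value: int) -> list[int]:
--     repeated: list[int] = []
--     max_digits = len(str(max_value))
--     for block_len in range(1, max_digits + 1):
--         base_start = 10 ** (block_len - 1)
--         base_end = 10**block_len - 1
--         for block in range(base_start, base_end + 1):
--             s = str(block)
--             repeated_str = s + s
--             while len(repeated_str) <= max_digits:
--                 num = int(repeated_str)
--                 if num > max_value:
--                     break
--                 repeated.append(num)
--                 repeated_str += s
--             if int(str(base_start) * 2) > max_value: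
--                 break
--     return sorted(set(repeated))
-- ===== SOURCE B (Python) =====
-- def generate_repeated_numbers(max_value: int) -> list[int]:
--     # Single scan over block values b = 1, 2, 3, ...; d is the smallest power of 10
--     # above b, so appending one more copy of b's digits is num -> num * d + b.
--     # Stop as soon as the doubled block b*(d+1) already exceeds max_value: doubled
--     # blocks grow monotonically with b, so no later b can contribute either.
--     found = set()
--     b, d = 1, 10
--     while b * (d + 1) <= max_value:
--         num = b * (d + 1)
--         while num <= max_value:
--             found.add(num)
--             num = num * d + b
--         b += 1
--         if b == d:
--             d *= 10
--     return sorted(found)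
-- ===== Notes on version B (the rewrite author's own statement) =====
-- stated objective: faster
-- what changed: Replaces A's nested block-length/block loops over string blocks (str concatenation plus int() parsing, scanning every block of a digit length even past the point where doubled blocks exceed max_value) by a single arithmetic scan over block values b = 1, 2, ... that maintains d = 10^(digits of b) and builds each repetition by num -> num*d + b, stopping as soon as the doubled block b*(d+1) exceeds max_value.
import Mathlib
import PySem

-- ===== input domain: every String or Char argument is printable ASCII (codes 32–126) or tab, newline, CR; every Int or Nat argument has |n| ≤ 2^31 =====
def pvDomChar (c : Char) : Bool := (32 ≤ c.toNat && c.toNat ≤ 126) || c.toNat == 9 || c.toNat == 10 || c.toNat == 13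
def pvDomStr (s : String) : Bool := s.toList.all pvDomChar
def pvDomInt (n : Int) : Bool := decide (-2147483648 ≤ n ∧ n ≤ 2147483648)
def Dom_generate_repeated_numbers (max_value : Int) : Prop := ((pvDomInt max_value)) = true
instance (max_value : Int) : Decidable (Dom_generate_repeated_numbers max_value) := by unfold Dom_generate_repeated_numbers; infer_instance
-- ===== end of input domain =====

-- B changes the algorithm: one arithmetic scan over block values instead of A's nested
-- string-based length/block loops (see claim.json); equivalence is proved for every Int input.

-- ===== PORT A =====

-- int(s) for the strings this algorithm builds: `s` is always a nonempty string of the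
-- digits 0-9 (concatenated copies of str(block) for block >= 1), and on such strings
-- Python's int() is exactly this left-to-right digit fold.  (The general PySem primitive
-- PySem.Int.ofStr? computes the same value here, but its parser is a private definition
-- that proofs cannot unfold, so the digit-string case is transcribed by hand, step for step.)
def pvIntOfDigits (cs : List Char) : Int :=
  ((cs.foldl (fun a c => a * 10 + (c.toNat - 48)) 0 : Nat) : Int)

-- the inner `while len(repeated_str) <= max_digits: ...` loop; the fuel only makes the
-- recursion total (each pass grows repeated_str by the nonempty s, so max_digits.toNat + 2
-- passes are never exhausted before the length test fails)
def pvAWhile (fuel : Nat) (max_value max_digits : Int) (s rs : List Char) (repeated : List Int) : List Int :=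
  match fuel with
  | 0 => repeated
  | fuel + 1 =>
    if PySem.Chars.len rs ≤ max_digits then
      let num := pvIntOfDigits rs
      if num > max_value then repeated
      else pvAWhile fuel max_value max_digits s (rs ++ s) (repeated ++ [num])
    else repeated

-- the inner `for block in range(base_start, base_end + 1): ...` loop with its break;
-- Python's range is a lazy counter, so it is ported as a counting recursion (fuel =
-- the exact number of range elements) rather than a materialized list
def pvAFor (fuel : Nat) (max_value max_digits base_start : Int) (block stop : Int) (repeated : List Int) : List Int :=
  match fuel with
  | 0 => repeated
  | fuel + 1 =>
    if block < stop then
      let s := PySem.Int.toChars block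
      let repeated_str := s ++ s
      let repeated' := pvAWhile (max_digits.toNat + 2) max_value max_digits s repeated_str repeated
      if pvIntOfDigits (PySem.Int.toChars base_start ++ PySem.Int.toChars base_start) > max_value then
        repeated'
      else pvAFor fuel max_value max_digits base_start (block + 1) stop repeated'
    else repeated

-- the body of `for block_len in range(1, max_digits + 1)` (block_len >= 1 inside the loop,
-- so the .toNat exponents are exact for 10 ** (block_len - 1) and 10 ** block_len)
def pvABlock (max_value max_digits : Int) (repeated : List Int) (block_len : Int) : List Int :=
  let base_start : Int := 10 ^ (block_len - 1).toNat
  let base_end : Int := 10 ^ block_len.toNat - 1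
  pvAFor (base_end + 1 - base_start).toNat max_value max_digits base_start base_start (base_end + 1) repeated

def generate_repeated_numbers (max_value : Int) : List Int :=
  let max_digits : Int := PySem.Chars.len (PySem.Int.toChars max_value)
  let repeated : List Int :=
    (PySem.List.pyRange 1 (max_digits + 1) 1).foldl (pvABlock max_value max_digits) []
  PySem.List.sorted (PySem.Set.ofList repeated) (fun x => x) false

-- ===== PORT B =====

-- `while num <= max_value: found.add(num); num = num * d + b`; fuel only for totality
-- (num grows every pass, so max_value.toNat + 1 passes are never exhausted)
def pvBInner (fuel : Nat) (max_value d b num : Int) (found : PySem.Set Int) : PySem.Set Int :=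
  match fuel with
  | 0 => found
  | fuel + 1 =>
    if num ≤ max_value then pvBInner fuel max_value d b (num * d + b) (PySem.Set.add found num)
    else found

-- `while b * (d + 1) <= max_value: ...; b += 1; if b == d: d *= 10`; fuel as above
-- (b grows every pass and the guard forces b <= max_value)
def pvBOuter (fuel : Nat) (max_value b d : Int) (found : PySem.Set Int) : PySem.Set Int :=
  match fuel with
  | 0 => found
  | fuel + 1 =>
    if b * (d + 1) ≤ max_value then
      let found' := pvBInner (max_value.toNat + 1) max_value d b (b * (d + 1)) found
      let b' := b + 1
      let d' := if b' = d then d * 10 else d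
      pvBOuter fuel max_value b' d' found'
    else found

def generate_repeated_numbers_alt (max_value : Int) : List Int :=
  PySem.List.sorted (pvBOuter (max_value.toNat + 1) max_value 1 10 PySem.Set.empty) (fun x => x) false

-- ===== PRECONDITION & SPEC =====
def Spec_generate_repeated_numbers (max_value : Int) (out : List Int) : Prop := out = generate_repeated_numbers_alt max_value
instance (max_value : Int) (out : List Int) : Decidable (Spec_generate_repeated_numbers max_value out) := by unfold Spec_generate_repeated_numbers; infer_instance

-- ===== CLAIM (what is proved, stated in full; the proofs are below) =====
def Claim_equal_generate_repeated_numbers : Prop := ∀ (max_value : Int), Dom_generate_repeated_numbers max_value → Spec_generate_repeated_numbers max_value (generate_repeated_numbers max_value)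

-- ===== LEMMAS AND PROOFS =====

-- value of j concatenated copies of a digit block of value b, where p = 10 ^ (digits of b)
def pvV (b p : Nat) : Nat → Nat
  | 0 => 0
  | j + 1 => pvV b p j * p + b

-- j concatenated copies of a character block
def pvCopies (s : List Char) : Nat → List Char
  | 0 => []
  | j + 1 => pvCopies s j ++ s

-- the common description of both programs' result sets: repetitions (at least doubled)
-- of a digit block, bounded by max_value
def pvInS (max_value n : Int) : Prop :=
  ∃ b L k : Nat, 10 ^ (L - 1) ≤ b ∧ b < 10 ^ L ∧ 2 ≤ k ∧
    ((pvV b (10 ^ L) k : Nat) : Int) ≤ max_value ∧ n = ((pvV b (10 ^ L) k : Nat) : Int)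

lemma pvV_two (b p : Nat) : pvV b p 2 = b * (p + 1) := by
  simp [pvV]; ring

lemma pvV_ge (b p : Nat) {j : Nat} (hj : 1 ≤ j) : b ≤ pvV b p j := by
  cases j with
  | zero => omega
  | succ j => simp [pvV]

lemma pvV_lt_succ {b p : Nat} (hb : 1 ≤ b) (hp : 1 ≤ p) {j : Nat} :
    pvV b p j < pvV b p (j + 1) := by
  have h : pvV b p j ≤ pvV b p j * p := Nat.le_mul_of_pos_right _ hp
  have h2 : pvV b p (j + 1) = pvV b p j * p + b := rfl
  omega

lemma pvV_mono {b p : Nat} (hb : 1 ≤ b) (hp : 1 ≤ p) {j k : Nat} (h : j ≤ k) :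
    pvV b p j ≤ pvV b p k := by
  induction k with
  | zero => have : j = 0 := by omega
            subst this; exact le_refl _
  | succ k ih =>
    rcases Nat.lt_or_ge j (k + 1) with hlt | hge
    · exact le_trans (ih (by omega)) (le_of_lt (pvV_lt_succ hb hp))
    · have : j = k + 1 := by omega
      subst this; exact le_refl _

lemma pvV_lt_pow {b p : Nat} (hb : b < p) (j : Nat) : pvV b p j < p ^ j := by
  induction j with
  | zero => simp [pvV]
  | succ j ih =>
    have h1 : pvV b p j + 1 ≤ p ^ j := ih
    calc pvV b p j * p + b < pvV b p j * p + p := by omega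
      _ = (pvV b p j + 1) * p := by ring
      _ ≤ p ^ j * p := Nat.mul_le_mul_right _ h1
      _ = p ^ (j + 1) := (pow_succ p j).symm

lemma pow_le_pvV {b L : Nat} (hL : 1 ≤ L) (hlo : 10 ^ (L - 1) ≤ b) {j : Nat} (hj : 1 ≤ j) :
    10 ^ (j * L - 1) ≤ pvV b (10 ^ L) j := by
  induction j with
  | zero => omega
  | succ j ih =>
    rcases Nat.eq_zero_or_pos j with hj0 | hj1
    · subst hj0; simpa [pvV] using hlo
    · have hstep : 10 ^ (j * L - 1) * 10 ^ L ≤ pvV b (10 ^ L) j * 10 ^ L :=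
        Nat.mul_le_mul_right _ (ih hj1)
      have hpow : 10 ^ (j * L - 1) * 10 ^ L = 10 ^ ((j + 1) * L - 1) := by
        rw [← pow_add]
        congr 1
        have : 1 ≤ j * L := Nat.one_le_iff_ne_zero.mpr (by positivity)
        cases L with
        | zero => omega
        | succ L => ring_nf; omega
      calc 10 ^ ((j + 1) * L - 1) = 10 ^ (j * L - 1) * 10 ^ L := hpow.symm
        _ ≤ pvV b (10 ^ L) j * 10 ^ L := hstep
        _ ≤ pvV b (10 ^ L) j * 10 ^ L + b := by omega

lemma pvV_double_le {b b' L L' : Nat} (hbb : b ≤ b') (hlo : 10 ^ (L - 1) ≤ b)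
    (hhi' : b' < 10 ^ L') (hL : 1 ≤ L) : pvV b (10 ^ L) 2 ≤ pvV b' (10 ^ L') 2 := by
  rw [pvV_two, pvV_two]
  have hLL : L ≤ L' := by
    by_contra h
    have h1 : L' ≤ L - 1 := by omega
    have h2 : (10 : Nat) ^ L' ≤ 10 ^ (L - 1) := Nat.pow_le_pow_right (by norm_num) h1
    omega
  have : (10 : Nat) ^ L ≤ 10 ^ L' := Nat.pow_le_pow_right (by norm_num) hLL
  exact Nat.mul_le_mul hbb (by omega)

lemma pvLen_unique {b x y : Nat} (hx : 10 ^ (x - 1) ≤ b) (hx' : b < 10 ^ x)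
    (hy : 10 ^ (y - 1) ≤ b) (hy' : b < 10 ^ y) : x = y := by
  by_contra h
  rcases Nat.lt_or_ge x y with hlt | hge
  · have : (10 : Nat) ^ x ≤ 10 ^ (y - 1) := Nat.pow_le_pow_right (by norm_num) (by omega)
    omega
  · have : (10 : Nat) ^ y ≤ 10 ^ (x - 1) := Nat.pow_le_pow_right (by norm_num) (by omega)
    omega

-- digit-length facts (Nat.toDigits 10)
lemma pvLen_le_iff {n k : Nat} (hk : 0 < k) : (Nat.toDigits 10 n).length ≤ k ↔ n < 10 ^ k :=
  Nat.length_toDigits_le_iff (by norm_num) hk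

lemma pvLt_pow_len (n : Nat) : n < 10 ^ (Nat.toDigits 10 n).length := by
  exact (pvLen_le_iff Nat.length_toDigits_pos).mp (le_refl _)

lemma pvLen_eq_of_bounds {n L : Nat} (hlo : 10 ^ (L - 1) ≤ n) (hhi : n < 10 ^ L) (hL : 1 ≤ L)
    (_hn : 0 < n) : (Nat.toDigits 10 n).length = L := by
  have h1 : (Nat.toDigits 10 n).length ≤ L := (pvLen_le_iff (by omega)).mpr hhi
  by_contra h
  have h2 : (Nat.toDigits 10 n).length ≤ L - 1 := by omega
  have h3 : (10 : Nat) ^ (Nat.toDigits 10 n).length ≤ 10 ^ (L - 1) :=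
    Nat.pow_le_pow_right (by norm_num) h2
  have := pvLt_pow_len n
  omega

lemma pvDigitChar_toNat {d : Nat} (h : d < 10) : (Nat.digitChar d).toNat = d + 48 := by
  interval_cases d <;> rfl

lemma pvFoldl_toDigits (m : Nat) : ∀ acc : Nat,
    (Nat.toDigits 10 m).foldl (fun a c => a * 10 + (c.toNat - 48)) acc
      = acc * 10 ^ (Nat.toDigits 10 m).length + m := by
  induction m using Nat.strong_induction_on with
  | _ m ih =>
    intro acc
    by_cases hm : m < 10
    · rw [Nat.toDigits_of_lt_base hm]
      simp [List.foldl, pvDigitChar_toNat hm]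
    · have heq : Nat.toDigits 10 m = Nat.toDigits 10 (m / 10) ++ [(m % 10).digitChar] := by
        rw [Nat.toDigits_eq_if (by norm_num), if_neg hm]
      have hdiv : m / 10 < m := Nat.div_lt_self (by omega) (by norm_num)
      rw [heq, List.foldl_append]
      simp only [List.foldl]
      rw [ih (m / 10) hdiv]
      rw [pvDigitChar_toNat (Nat.mod_lt _ (by norm_num))]
      have hmod := Nat.div_add_mod m 10
      simp only [List.length_append, List.length_cons, List.length_nil]
      rw [pow_succ]
      have : m % 10 + 48 - 48 = m % 10 := by omega
      rw [this]
      ring_nf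
      omega

lemma pvCopies_two (s : List Char) : pvCopies s 2 = s ++ s := by
  simp [pvCopies]

lemma pvCopies_length (s : List Char) (j : Nat) : (pvCopies s j).length = j * s.length := by
  induction j with
  | zero => simp [pvCopies]
  | succ j ih => simp [pvCopies, ih]; ring

lemma pvFoldl_copies (b : Nat) (j : Nat) :
    (pvCopies (Nat.toDigits 10 b) j).foldl (fun a c => a * 10 + (c.toNat - 48)) 0
      = pvV b (10 ^ (Nat.toDigits 10 b).length) j := by
  induction j with
  | zero => simp [pvCopies, pvV]
  | succ j ih =>
    show (pvCopies (Nat.toDigits 10 b) j ++ Nat.toDigits 10 b).foldl _ 0 = _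
    rw [List.foldl_append, ih, pvFoldl_toDigits]
    rfl

lemma pvIntOfDigits_copies {b L : Nat} (hlen : (Nat.toDigits 10 b).length = L) (j : Nat) :
    pvIntOfDigits (pvCopies (Nat.toDigits 10 b) j) = ((pvV b (10 ^ L) j : Nat) : Int) := by
  unfold pvIntOfDigits
  rw [pvFoldl_copies, hlen]

lemma pvToChars_natCast (m : Nat) : PySem.Int.toChars ((m : Nat) : Int) = Nat.toDigits 10 m := by
  unfold PySem.Int.toChars
  rw [if_neg (by omega)]
  simp

lemma pvMaxd_ge_one (v : Int) : 1 ≤ PySem.Chars.len (PySem.Int.toChars v) := by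
  have h2 := Nat.length_toDigits_pos (b := 10) (n := v.toNat)
  have h3 := Nat.length_toDigits_pos (b := 10) (n := v.natAbs)
  unfold PySem.Int.toChars
  split
  · simp [PySem.Chars.len_eq]
  · simp [PySem.Chars.len_eq]; omega

lemma pvMaxd_of_nonneg {v : Int} (hv : 0 ≤ v) :
    PySem.Chars.len (PySem.Int.toChars v) = ((Nat.toDigits 10 v.toNat).length : Int) := by
  unfold PySem.Int.toChars
  rw [if_neg (by omega)]
  simp [PySem.Chars.len_eq]

-- ===== the A-side characterization =====

lemma pvAWhile_mem (max_value max_digits : Int) (b L : Nat)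
    (hb : 1 ≤ b) (hL : 1 ≤ L) (hlen : (Nat.toDigits 10 b).length = L) :
    ∀ (fuel j : Nat) (repeated : List Int) (n : Int), 2 ≤ j →
      max_digits < ((j * L : Nat) : Int) + (fuel : Int) →
      (n ∈ pvAWhile fuel max_value max_digits (Nat.toDigits 10 b)
            (pvCopies (Nat.toDigits 10 b) j) repeated
        ↔ n ∈ repeated ∨ ∃ k : Nat, j ≤ k ∧ ((k * L : Nat) : Int) ≤ max_digits ∧
            ((pvV b (10 ^ L) k : Nat) : Int) ≤ max_value ∧
            n = ((pvV b (10 ^ L) k : Nat) : Int)) := by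
  have hp : 1 ≤ 10 ^ L := Nat.one_le_pow _ _ (by norm_num)
  intro fuel
  induction fuel with
  | zero =>
    intro j repeated n hj hfuel
    simp only [pvAWhile]
    constructor
    · exact fun h => Or.inl h
    · rintro (h | ⟨k, hk, hkl, -, -⟩)
      · exact h
      · exfalso
        have hmul : j * L ≤ k * L := Nat.mul_le_mul_right L hk
        push_cast at hfuel hkl
        omega
  | succ fuel ih =>
    intro j repeated n hj hfuel
    have hlenrs : PySem.Chars.len (pvCopies (Nat.toDigits 10 b) j) = ((j * L : Nat) : Int) := by
      simp [PySem.Chars.len_eq, pvCopies_length, hlen]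
    simp only [pvAWhile, hlenrs, pvIntOfDigits_copies hlen j]
    by_cases hc1 : ((j * L : Nat) : Int) ≤ max_digits
    · rw [if_pos hc1]
      by_cases hc2 : ((pvV b (10 ^ L) j : Nat) : Int) > max_value
      · rw [if_pos hc2]
        constructor
        · exact fun h => Or.inl h
        · rintro (h | ⟨k, hk, -, hkv, -⟩)
          · exact h
          · exfalso
            have hmono : pvV b (10 ^ L) j ≤ pvV b (10 ^ L) k := pvV_mono hb hp hk
            push_cast at hc2 hkv
            omega
      · rw [if_neg hc2]
        have hstep : pvCopies (Nat.toDigits 10 b) j ++ Nat.toDigits 10 b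
            = pvCopies (Nat.toDigits 10 b) (j + 1) := rfl
        rw [hstep]
        have hfuel' : max_digits < (((j + 1) * L : Nat) : Int) + (fuel : Int) := by
          have hmul : j * L + 1 ≤ (j + 1) * L := by
            calc j * L + 1 ≤ j * L + L := by omega
              _ = (j + 1) * L := by ring
          have hmul' : ((j * L : Nat) : Int) + 1 ≤ (((j + 1) * L : Nat) : Int) := by
            exact_mod_cast hmul
          omega
        rw [ih (j + 1) (repeated ++ [((pvV b (10 ^ L) j : Nat) : Int)]) n (by omega) hfuel']
        simp only [List.mem_append, List.mem_singleton]
        constructor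
        · rintro ((h | h) | ⟨k, hk, hkl, hkv, hkn⟩)
          · exact Or.inl h
          · exact Or.inr ⟨j, le_refl _, hc1, by omega, h⟩
          · exact Or.inr ⟨k, by omega, hkl, hkv, hkn⟩
        · rintro (h | ⟨k, hk, hkl, hkv, hkn⟩)
          · exact Or.inl (Or.inl h)
          · rcases Nat.eq_or_lt_of_le hk with heq | hlt
            · exact Or.inl (Or.inr (by rw [hkn, ← heq]))
            · exact Or.inr ⟨k, by omega, hkl, hkv, hkn⟩
    · rw [if_neg hc1]
      constructor
      · exact fun h => Or.inl h
      · rintro (h | ⟨k, hk, hkl, -, -⟩)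
        · exact h
        · exfalso
          have hmul : j * L ≤ k * L := Nat.mul_le_mul_right L hk
          push_cast at hc1 hkl
          omega

lemma pvAFor_mem (max_value max_digits : Int) (L : Nat) (hL : 1 ≤ L) (_hmd : 1 ≤ max_digits) :
    ∀ (c cur : Nat), 10 ^ L = cur + c → 10 ^ (L - 1) ≤ cur →
    ∀ (repeated : List Int) (n : Int),
      (n ∈ pvAFor c max_value max_digits ((10 ^ (L - 1) : Nat) : Int)
            ((cur : Nat) : Int) ((10 ^ L : Nat) : Int) repeated
        ↔ n ∈ repeated ∨ ∃ b k : Nat, cur ≤ b ∧ b < 10 ^ L ∧ 2 ≤ k ∧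
            ((k * L : Nat) : Int) ≤ max_digits ∧
            ((pvV b (10 ^ L) k : Nat) : Int) ≤ max_value ∧
            n = ((pvV b (10 ^ L) k : Nat) : Int)) := by
  have hp : 1 ≤ 10 ^ L := Nat.one_le_pow _ _ (by norm_num)
  have hbs0 : 0 < 10 ^ (L - 1) := pow_pos (by norm_num) _
  have hbslt : 10 ^ (L - 1) < 10 ^ L := Nat.pow_lt_pow_right (by norm_num) (by omega)
  have hlenbs : (Nat.toDigits 10 (10 ^ (L - 1))).length = L :=
    pvLen_eq_of_bounds (le_refl _) hbslt hL hbs0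
  intro c
  induction c with
  | zero =>
    intro cur hsum hcur repeated n
    simp only [pvAFor]
    constructor
    · exact fun h => Or.inl h
    · rintro (h | ⟨b, k, hb1, hb2, -, -, -, -⟩)
      · exact h
      · omega
  | succ c ihc =>
    intro cur hsum hcur repeated n
    have hcurpos : 0 < cur := by omega
    have hcurlt : cur < 10 ^ L := by omega
    have hcastlt : ((cur : Nat) : Int) < ((10 ^ L : Nat) : Int) := by exact_mod_cast hcurlt
    simp only [pvAFor, pvToChars_natCast, if_pos hcastlt]
    have hlencur : (Nat.toDigits 10 cur).length = L :=
      pvLen_eq_of_bounds hcur hcurlt hL hcurpos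
    have hcop2 : Nat.toDigits 10 cur ++ Nat.toDigits 10 cur
        = pvCopies (Nat.toDigits 10 cur) 2 := (pvCopies_two _).symm
    have hcopbs : Nat.toDigits 10 (10 ^ (L - 1)) ++ Nat.toDigits 10 (10 ^ (L - 1))
        = pvCopies (Nat.toDigits 10 (10 ^ (L - 1))) 2 := (pvCopies_two _).symm
    rw [hcop2, hcopbs]
    have hfuel : max_digits < ((2 * L : Nat) : Int) + ((max_digits.toNat + 2 : Nat) : Int) := by
      have h1 := Int.self_le_toNat max_digits
      have h2 : (0 : Int) ≤ ((2 * L : Nat) : Int) := Int.natCast_nonneg _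
      push_cast
      push_cast at h2
      omega
    have hW := pvAWhile_mem max_value max_digits cur L (by omega) hL hlencur
      (max_digits.toNat + 2) 2 repeated n (le_refl _) hfuel
    have hbrval : pvIntOfDigits (pvCopies (Nat.toDigits 10 (10 ^ (L - 1))) 2)
        = ((pvV (10 ^ (L - 1)) (10 ^ L) 2 : Nat) : Int) := pvIntOfDigits_copies hlenbs 2
    rw [hbrval]
    by_cases hbr : ((pvV (10 ^ (L - 1)) (10 ^ L) 2 : Nat) : Int) > max_value
    · rw [if_pos hbr]
      rw [hW]
      constructor
      · rintro (h | ⟨k, hk, -, hkv, -⟩)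
        · exact Or.inl h
        · exfalso
          have h1 : pvV (10 ^ (L - 1)) (10 ^ L) 2 ≤ pvV cur (10 ^ L) 2 :=
            pvV_double_le hcur (le_refl _) hcurlt hL
          have h2 : pvV cur (10 ^ L) 2 ≤ pvV cur (10 ^ L) k := pvV_mono (by omega) hp hk
          push_cast at hbr hkv
          omega
      · rintro (h | ⟨b, k, hb1, hb2, hk2, -, hkv, -⟩)
        · exact Or.inl h
        · exfalso
          have h1 : pvV (10 ^ (L - 1)) (10 ^ L) 2 ≤ pvV b (10 ^ L) 2 :=
            pvV_double_le (by omega) (le_refl _) hb2 hL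
          have h2 : pvV b (10 ^ L) 2 ≤ pvV b (10 ^ L) k := pvV_mono (by omega) hp hk2
          push_cast at hbr hkv
          omega
    · rw [if_neg hbr]
      have hcast1 : ((cur : Nat) : Int) + 1 = ((cur + 1 : Nat) : Int) := by push_cast; ring
      rw [hcast1]
      rw [ihc (cur + 1) (by omega) (by omega) _ n]
      rw [hW]
      constructor
      · rintro ((h | ⟨k, hk, hkl, hkv, hkn⟩) | ⟨b, k, hb1, hb2, hk2, hkl, hkv, hkn⟩)
        · exact Or.inl h
        · exact Or.inr ⟨cur, k, le_refl _, hcurlt, hk, hkl, hkv, hkn⟩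
        · exact Or.inr ⟨b, k, by omega, hb2, hk2, hkl, hkv, hkn⟩
      · rintro (h | ⟨b, k, hb1, hb2, hk2, hkl, hkv, hkn⟩)
        · exact Or.inl (Or.inl h)
        · rcases Nat.eq_or_lt_of_le hb1 with heq | hlt
          · subst heq
            exact Or.inl (Or.inr ⟨k, hk2, hkl, hkv, hkn⟩)
          · exact Or.inr ⟨b, k, by omega, hb2, hk2, hkl, hkv, hkn⟩

lemma pvOuter_mem (max_value max_digits : Int) (hmd : 1 ≤ max_digits) :
    ∀ (m : Nat) (repeated : List Int) (n : Int),
      (n ∈ (PySem.List.pyRange 1 ((m : Int) + 1) 1).foldl (pvABlock max_value max_digits) repeated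
        ↔ n ∈ repeated ∨ ∃ L b k : Nat, 1 ≤ L ∧ L ≤ m ∧ 10 ^ (L - 1) ≤ b ∧ b < 10 ^ L ∧
            2 ≤ k ∧ ((k * L : Nat) : Int) ≤ max_digits ∧
            ((pvV b (10 ^ L) k : Nat) : Int) ≤ max_value ∧
            n = ((pvV b (10 ^ L) k : Nat) : Int)) := by
  intro m
  induction m with
  | zero =>
    intro repeated n
    rw [show ((0 : Nat) : Int) + 1 = 1 by norm_num, PySem.List.pyRange_one_eq_nil (le_refl 1)]
    simp only [List.foldl_nil]
    constructor
    · exact fun h => Or.inl h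
    · rintro (h | ⟨L, b, k, hL1, hLm, -, -, -, -, -, -⟩)
      · exact h
      · omega
  | succ m ihm =>
    intro repeated n
    have hX : (1 : Int) ≤ ((m + 1 : Nat) : Int) := by push_cast; omega
    rw [show (((m + 1 : Nat) : Int)) + 1 = ((m + 1 : Nat) : Int) + 1 from rfl]
    rw [PySem.List.pyRange_one_succ_right hX, List.foldl_append]
    simp only [List.foldl_cons, List.foldl_nil]
    have hblock : ∀ acc : List Int, pvABlock max_value max_digits acc ((m + 1 : Nat) : Int)
        = pvAFor (10 ^ (m + 1) - 10 ^ m) max_value max_digits ((10 ^ m : Nat) : Int)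
            ((10 ^ m : Nat) : Int) ((10 ^ (m + 1) : Nat) : Int) acc := by
      intro acc
      unfold pvABlock
      have h1 : (((m + 1 : Nat) : Int) - 1).toNat = m := by
        rw [show ((m + 1 : Nat) : Int) - 1 = ((m : Nat) : Int) by push_cast; ring]
        exact Int.toNat_natCast _
      have h2 : ((m + 1 : Nat) : Int).toNat = m + 1 := Int.toNat_natCast _
      rw [h1, h2]
      show pvAFor ((10 : Int) ^ (m + 1) - 1 + 1 - (10 : Int) ^ m).toNat
          max_value max_digits ((10 : Int) ^ m) ((10 : Int) ^ m) ((10 : Int) ^ (m + 1) - 1 + 1) acc = _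
      have h3 : (10 : Int) ^ m = ((10 ^ m : Nat) : Int) := by push_cast; ring
      have h4 : (10 : Int) ^ (m + 1) - 1 + 1 = ((10 ^ (m + 1) : Nat) : Int) := by push_cast; ring
      have h5 : ((10 : Int) ^ (m + 1) - 1 + 1 - (10 : Int) ^ m).toNat = 10 ^ (m + 1) - 10 ^ m := by
        rw [show (10 : Int) ^ (m + 1) - 1 + 1 - (10 : Int) ^ m
            = ((10 ^ (m + 1) - 10 ^ m : Nat) : Int) by
          push_cast [Nat.pow_le_pow_right (show 1 ≤ 10 by norm_num) (Nat.le_succ m)]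
          ring]
        exact Int.toNat_natCast _
      rw [h5, h3, h4]
    rw [hblock]
    have hpowle : (10 : Nat) ^ m ≤ 10 ^ (m + 1) := Nat.pow_le_pow_right (by norm_num) (by omega)
    have hsum : (10 : Nat) ^ (m + 1) = 10 ^ m + (10 ^ (m + 1) - 10 ^ m) := by omega
    have hcur : (10 : Nat) ^ ((m + 1) - 1) ≤ 10 ^ m := by simp
    have hcastm : ((m + 1 : Nat) : Int) = ((m : Nat) : Int) + 1 := by push_cast; ring
    rw [hcastm]
    have hFor := pvAFor_mem max_value max_digits (m + 1) (by omega) hmd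
      (10 ^ (m + 1) - 10 ^ m) (10 ^ m) hsum hcur
    simp only [Nat.add_sub_cancel] at hFor
    rw [hFor]
    rw [ihm]
    constructor
    · rintro ((h | ⟨L, b, k, hL1, hLm, hb1, hb2, hk2, hkl, hkv, hkn⟩) |
        ⟨b, k, hb1, hb2, hk2, hkl, hkv, hkn⟩)
      · exact Or.inl h
      · exact Or.inr ⟨L, b, k, hL1, by omega, hb1, hb2, hk2, hkl, hkv, hkn⟩
      · exact Or.inr ⟨m + 1, b, k, by omega, le_refl _, by simpa using hb1, hb2, hk2, hkl, hkv, hkn⟩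
    · rintro (h | ⟨L, b, k, hL1, hLm, hb1, hb2, hk2, hkl, hkv, hkn⟩)
      · exact Or.inl (Or.inl h)
      · rcases Nat.lt_or_ge L (m + 1) with hlt | hge
        · exact Or.inl (Or.inr ⟨L, b, k, hL1, by omega, hb1, hb2, hk2, hkl, hkv, hkn⟩)
        · have hLeq : L = m + 1 := by omega
          subst hLeq
          exact Or.inr ⟨b, k, by simpa using hb1, hb2, hk2, hkl, hkv, hkn⟩

lemma pvA_mem (max_value : Int) (n : Int) :
    n ∈ (PySem.List.pyRange 1 (PySem.Chars.len (PySem.Int.toChars max_value) + 1) 1).foldl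
        (pvABlock max_value (PySem.Chars.len (PySem.Int.toChars max_value))) []
      ↔ pvInS max_value n := by
  have hmd : 1 ≤ PySem.Chars.len (PySem.Int.toChars max_value) := pvMaxd_ge_one _
  have hmdnat : PySem.Chars.len (PySem.Int.toChars max_value)
      = (((PySem.Chars.len (PySem.Int.toChars max_value)).toNat : Nat) : Int) :=
    (Int.toNat_of_nonneg (by omega)).symm
  rw [hmdnat, pvOuter_mem _ _ (by omega)]
  simp only [List.not_mem_nil, false_or]
  unfold pvInS
  constructor
  · rintro ⟨L, b, k, hL1, hLm, hb1, hb2, hk2, hkl, hkv, hkn⟩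
    exact ⟨b, L, k, hb1, hb2, hk2, hkv, hkn⟩
  · rintro ⟨b, L, k, hb1, hb2, hk2, hkv, hkn⟩
    have hL1 : 1 ≤ L := by
      rcases Nat.eq_zero_or_pos L with h0 | h1
    -- L = 0 contradicts 10^(L-1) ≤ b < 10^L = 1
      · subst h0; simp at hb1 hb2; omega
      · exact h1
    have hbpos : 0 < b := by
      have : (0 : Nat) < 10 ^ (L - 1) := pow_pos (by norm_num) _
      omega
    have hkL1 : 1 ≤ k * L := by
      have := Nat.mul_le_mul (show 1 ≤ k by omega) hL1
      omega
    have hVge : 10 ^ (k * L - 1) ≤ pvV b (10 ^ L) k := pow_le_pvV hL1 hb1 (by omega)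
    have hVlt : pvV b (10 ^ L) k < 10 ^ (k * L) := by
      have := pvV_lt_pow hb2 k
      rwa [← pow_mul, Nat.mul_comm L k] at this
    have hVpos : 0 < pvV b (10 ^ L) k := by
      have : (0 : Nat) < 10 ^ (k * L - 1) := pow_pos (by norm_num) _
      omega
    have hVten : 10 ≤ pvV b (10 ^ L) k := by
      have h2kl : 2 ≤ k * L := le_trans (by omega) (Nat.mul_le_mul (le_refl k) hL1)
      have : (10 : Nat) ^ 1 ≤ 10 ^ (k * L - 1) := Nat.pow_le_pow_right (by norm_num) (by omega)
      simpa using le_trans this hVge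
    have hmv0 : 0 ≤ max_value := by omega
    have hVle : pvV b (10 ^ L) k ≤ max_value.toNat := by omega
    have hlenV : (Nat.toDigits 10 (pvV b (10 ^ L) k)).length = k * L :=
      pvLen_eq_of_bounds hVge hVlt hkL1 hVpos
    have hlenmono : (Nat.toDigits 10 (pvV b (10 ^ L) k)).length
        ≤ (Nat.toDigits 10 max_value.toNat).length := by
      rw [pvLen_le_iff Nat.length_toDigits_pos]
      exact lt_of_le_of_lt hVle (pvLt_pow_len _)
    have hmdeq : PySem.Chars.len (PySem.Int.toChars max_value)
        = ((Nat.toDigits 10 max_value.toNat).length : Int) := pvMaxd_of_nonneg hmv0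
    refine ⟨L, b, k, hL1, ?_, hb1, hb2, hk2, ?_, hkv, hkn⟩
    · have : L ≤ k * L := Nat.le_mul_of_pos_left L (by omega)
      omega
    · rw [← hmdnat, hmdeq]
      have : k * L ≤ (Nat.toDigits 10 max_value.toNat).length := by omega
      exact_mod_cast this

-- ===== the B-side characterization =====

lemma pvBInner_mem (max_value : Int) (b L : Nat) (hb : 1 ≤ b) (_hL : 1 ≤ L) :
    ∀ (fuel j : Nat) (found : PySem.Set Int) (n : Int), 2 ≤ j →
      max_value < ((pvV b (10 ^ L) j : Nat) : Int) + (fuel : Int) →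
      (n ∈ pvBInner fuel max_value ((10 ^ L : Nat) : Int) ((b : Nat) : Int)
            ((pvV b (10 ^ L) j : Nat) : Int) found
        ↔ n ∈ found ∨ ∃ k : Nat, j ≤ k ∧ ((pvV b (10 ^ L) k : Nat) : Int) ≤ max_value ∧
            n = ((pvV b (10 ^ L) k : Nat) : Int)) := by
  have hp : 1 ≤ 10 ^ L := Nat.one_le_pow _ _ (by norm_num)
  intro fuel
  induction fuel with
  | zero =>
    intro j found n hj hfuel
    simp only [pvBInner]
    constructor
    · exact fun h => Or.inl h
    · rintro (h | ⟨k, hk, hkv, -⟩)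
      · exact h
      · exfalso
        have := pvV_mono hb hp hk
        push_cast at hfuel hkv
        omega
  | succ fuel ih =>
    intro j found n hj hfuel
    simp only [pvBInner]
    by_cases hg : ((pvV b (10 ^ L) j : Nat) : Int) ≤ max_value
    · rw [if_pos hg]
      have harg : ((pvV b (10 ^ L) j : Nat) : Int) * ((10 ^ L : Nat) : Int) + ((b : Nat) : Int)
          = ((pvV b (10 ^ L) (j + 1) : Nat) : Int) := by
        have h0 : pvV b (10 ^ L) (j + 1) = pvV b (10 ^ L) j * 10 ^ L + b := rfl
        rw [h0]; push_cast; ring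
      rw [harg]
      have hfuel' : max_value < ((pvV b (10 ^ L) (j + 1) : Nat) : Int) + (fuel : Int) := by
        have := pvV_lt_succ hb hp (j := j)
        push_cast at hfuel ⊢
        omega
      rw [ih (j + 1) (PySem.Set.add found ((pvV b (10 ^ L) j : Nat) : Int)) n (by omega) hfuel']
      rw [PySem.Set.mem_add]
      constructor
      · rintro ((h | h) | ⟨k, hk, hkv, hkn⟩)
        · exact Or.inl h
        · exact Or.inr ⟨j, le_refl _, hg, h⟩
        · exact Or.inr ⟨k, by omega, hkv, hkn⟩
      · rintro (h | ⟨k, hk, hkv, hkn⟩)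
        · exact Or.inl (Or.inl h)
        · rcases Nat.eq_or_lt_of_le hk with heq | hlt
          · exact Or.inl (Or.inr (by rw [hkn, ← heq]))
          · exact Or.inr ⟨k, by omega, hkv, hkn⟩
    · rw [if_neg hg]
      constructor
      · exact fun h => Or.inl h
      · rintro (h | ⟨k, hk, hkv, -⟩)
        · exact h
        · exfalso
          have := pvV_mono hb hp hk
          push_cast at hg hkv
          omega

lemma pvBOuter_mem (max_value : Int) :
    ∀ (fuel : Nat) (b L : Nat) (found : PySem.Set Int) (n : Int),
      1 ≤ b → 10 ^ (L - 1) ≤ b → b < 10 ^ L → 1 ≤ L →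
      max_value < ((b : Nat) : Int) + (fuel : Int) →
      (n ∈ pvBOuter fuel max_value ((b : Nat) : Int) ((10 ^ L : Nat) : Int) found
        ↔ n ∈ found ∨ ∃ b' L' k : Nat, b ≤ b' ∧ 10 ^ (L' - 1) ≤ b' ∧ b' < 10 ^ L' ∧ 2 ≤ k ∧
            ((pvV b' (10 ^ L') k : Nat) : Int) ≤ max_value ∧
            n = ((pvV b' (10 ^ L') k : Nat) : Int)) := by
  intro fuel
  induction fuel with
  | zero =>
    intro b L found n hb hlo hhi hL hfuel
    simp only [pvBOuter]
    constructor
    · exact fun h => Or.inl h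
    · rintro (h | ⟨b', L', k, hbb, hlo', hhi', hk2, hkv, -⟩)
      · exact h
      · exfalso
        have h1 : b' ≤ pvV b' (10 ^ L') k := pvV_ge _ _ (by omega)
        push_cast at hfuel hkv
        omega
  | succ fuel ih =>
    intro b L found n hb hlo hhi hL hfuel
    have hp : 1 ≤ 10 ^ L := Nat.one_le_pow _ _ (by norm_num)
    simp only [pvBOuter]
    have hg2 : ((b : Nat) : Int) * (((10 ^ L : Nat) : Int) + 1)
        = ((pvV b (10 ^ L) 2 : Nat) : Int) := by
      rw [pvV_two]; push_cast; ring
    rw [hg2]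
    by_cases hg : ((pvV b (10 ^ L) 2 : Nat) : Int) ≤ max_value
    · rw [if_pos hg]
      have hmv0 : 0 ≤ max_value := le_trans (Int.natCast_nonneg _) hg
      have hInner := pvBInner_mem max_value b L hb hL (max_value.toNat + 1) 2 found n
        (le_refl _) (by omega)
      by_cases hbd : b + 1 = 10 ^ L
      · have hbd' : ((b : Nat) : Int) + 1 = ((10 ^ L : Nat) : Int) := by exact_mod_cast hbd
        rw [if_pos hbd']
        have hd' : ((10 ^ L : Nat) : Int) * 10 = ((10 ^ (L + 1) : Nat) : Int) := by
          push_cast; ring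
        have hb' : ((b : Nat) : Int) + 1 = ((b + 1 : Nat) : Int) := by push_cast; ring
        rw [hd', hb']
        rw [ih (b + 1) (L + 1) _ n (by omega)
          (by simpa using le_of_eq hbd.symm)
          (by
            have : (10 : Nat) ^ L < 10 ^ (L + 1) := Nat.pow_lt_pow_right (by norm_num) (by omega)
            omega)
          (by omega) (by push_cast at hfuel ⊢; omega)]
        rw [hInner]
        constructor
        · rintro ((h | ⟨k, hk2, hkv, hkn⟩) | ⟨b', L', k, hbb, hlo', hhi', hk2, hkv, hkn⟩)
          · exact Or.inl h
          · exact Or.inr ⟨b, L, k, le_refl _, hlo, hhi, hk2, hkv, hkn⟩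
          · exact Or.inr ⟨b', L', k, by omega, hlo', hhi', hk2, hkv, hkn⟩
        · rintro (h | ⟨b', L', k, hbb, hlo', hhi', hk2, hkv, hkn⟩)
          · exact Or.inl (Or.inl h)
          · rcases Nat.eq_or_lt_of_le hbb with heq | hlt
            · subst heq
              have : L' = L := pvLen_unique hlo' hhi' hlo hhi
              subst this
              exact Or.inl (Or.inr ⟨k, hk2, hkv, hkn⟩)
            · exact Or.inr ⟨b', L', k, by omega, hlo', hhi', hk2, hkv, hkn⟩
      · have hbd' : ¬ (((b : Nat) : Int) + 1 = ((10 ^ L : Nat) : Int)) := by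
          intro h; exact hbd (by exact_mod_cast h)
        rw [if_neg hbd']
        have hb' : ((b : Nat) : Int) + 1 = ((b + 1 : Nat) : Int) := by push_cast; ring
        rw [hb']
        rw [ih (b + 1) L _ n (by omega) (by omega) (by omega) hL
          (by push_cast at hfuel ⊢; omega)]
        rw [hInner]
        constructor
        · rintro ((h | ⟨k, hk2, hkv, hkn⟩) | ⟨b', L', k, hbb, hlo', hhi', hk2, hkv, hkn⟩)
          · exact Or.inl h
          · exact Or.inr ⟨b, L, k, le_refl _, hlo, hhi, hk2, hkv, hkn⟩
          · exact Or.inr ⟨b', L', k, by omega, hlo', hhi', hk2, hkv, hkn⟩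
        · rintro (h | ⟨b', L', k, hbb, hlo', hhi', hk2, hkv, hkn⟩)
          · exact Or.inl (Or.inl h)
          · rcases Nat.eq_or_lt_of_le hbb with heq | hlt
            · subst heq
              have : L' = L := pvLen_unique hlo' hhi' hlo hhi
              subst this
              exact Or.inl (Or.inr ⟨k, hk2, hkv, hkn⟩)
            · exact Or.inr ⟨b', L', k, by omega, hlo', hhi', hk2, hkv, hkn⟩
    · rw [if_neg hg]
      constructor
      · exact fun h => Or.inl h
      · rintro (h | ⟨b', L', k, hbb, hlo', hhi', hk2, hkv, -⟩)
        · exact h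
        · exfalso
          have hL' : 1 ≤ L' := by
            rcases Nat.eq_zero_or_pos L' with h0 | h1
            · exfalso; rw [h0] at hlo' hhi'; simp at hlo' hhi'; omega
            · exact h1
          have h1 : pvV b (10 ^ L) 2 ≤ pvV b' (10 ^ L') 2 := pvV_double_le hbb hlo hhi' hL
          have h2 : pvV b' (10 ^ L') 2 ≤ pvV b' (10 ^ L') k := by
            have hb'1 : 1 ≤ b' := by omega
            exact pvV_mono hb'1 (Nat.one_le_pow _ _ (by norm_num)) hk2
          push_cast at hg hkv
          omega

lemma pvB_mem (max_value : Int) (n : Int) :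
    n ∈ pvBOuter (max_value.toNat + 1) max_value 1 10 PySem.Set.empty ↔ pvInS max_value n := by
  have h1 : (1 : Int) = ((1 : Nat) : Int) := rfl
  have h10 : (10 : Int) = ((10 ^ 1 : Nat) : Int) := by norm_num
  rw [h1, h10]
  rw [pvBOuter_mem max_value (max_value.toNat + 1) 1 1 PySem.Set.empty n (le_refl _)
    (by norm_num) (by norm_num) (le_refl _) (by push_cast; omega)]
  have hempty : n ∉ (PySem.Set.empty : PySem.Set Int) := by
    simp [PySem.Set.empty]
  unfold pvInS
  constructor
  · rintro (h | ⟨b', L', k, -, hlo', hhi', hk2, hkv, hkn⟩)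
    · exact absurd h hempty
    · exact ⟨b', L', k, hlo', hhi', hk2, hkv, hkn⟩
  · rintro ⟨b', L', k, hlo', hhi', hk2, hkv, hkn⟩
    have : (0 : Nat) < 10 ^ (L' - 1) := pow_pos (by norm_num) _
    exact Or.inr ⟨b', L', k, by omega, hlo', hhi', hk2, hkv, hkn⟩

lemma pvBInner_nodup (max_value d b : Int) :
    ∀ (fuel : Nat) (num : Int) (found : PySem.Set Int), found.Nodup →
      (pvBInner fuel max_value d b num found).Nodup := by
  intro fuel
  induction fuel with
  | zero => intro num found h; exact h
  | succ fuel ih =>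
    intro num found h
    simp only [pvBInner]
    split
    · exact ih _ _ (PySem.Set.nodup_add _ _ h)
    · exact h

lemma pvBOuter_nodup (max_value : Int) :
    ∀ (fuel : Nat) (b d : Int) (found : PySem.Set Int), found.Nodup →
      (pvBOuter fuel max_value b d found).Nodup := by
  intro fuel
  induction fuel with
  | zero => intro b d found h; exact h
  | succ fuel ih =>
    intro b d found h
    simp only [pvBOuter]
    split
    · exact ih _ _ _ (pvBInner_nodup _ _ _ _ _ _ h)
    · exact h

-- ===== VERDICT (by name: the statement is the Claim_ definition above) =====
theorem generate_repeated_numbers_spec : Claim_equal_generate_repeated_numbers := by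
  intro max_value _
  unfold Spec_generate_repeated_numbers generate_repeated_numbers generate_repeated_numbers_alt
  have hA := pvA_mem max_value
  have hB := pvB_mem max_value
  have hperm : (PySem.Set.ofList
      ((PySem.List.pyRange 1 (PySem.Chars.len (PySem.Int.toChars max_value) + 1) 1).foldl
        (pvABlock max_value (PySem.Chars.len (PySem.Int.toChars max_value))) [])).Perm
      (pvBOuter (max_value.toNat + 1) max_value 1 10 PySem.Set.empty) := by
    rw [List.perm_ext_iff_of_nodup (PySem.Set.nodup_ofList _)
      (pvBOuter_nodup max_value _ _ _ _ (by simp [PySem.Set.empty]))]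
    intro a
    rw [PySem.Set.mem_ofList, hA a, hB a]
  exact PySem.List.sorted_eq_sorted_of_perm _ _ _ (fun x y h => h) hperm
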